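-- pv_equiv track=rewrite | github.com/fitz-s/zeus | maintenance_worker/core/git_operation_guard.py | _push_targets_protected_branch
-- ===== SOURCE A (Python) =====
-- _PROTECTED_BRANCHES: frozenset[str] = frozenset({"main", "master"})
--
-- def _push_targets_protected_branch(argv: list[str]) -> bool:
--     """
--     Return True if this git push targets main or master.
--
--     Detects forms:
--       git push origin main
--       git push origin master
--       git push origin HEAD:main
--       git push origin refs/heads/main
--     """
--     # Collect non-flag tokens after 'push'
--     # argv[0] = git, argv[1] = push, argv[2+] = remote + refspecs/flags
--     refspec_tokens: list[str] = []
--     i = 2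
--     while i < len(argv):
--         token = argv[i]
--         if not token.startswith("-"):
--             refspec_tokens.append(token)
--         elif "=" not in token:
--             # Flag that takes a value: skip both
--             if token in {
--                 "--receive-pack",
--                 "--repo",
--                 "--push-option",
--                 "-o",
--                 "--recurse-submodules",
--                 "--signed",
--             }:
--                 i += 1  # skip the value token
--         i += 1
--
--     # First non-flag token after push is the remote; rest are refspecs.
--     # Check refspecs (position 1+) for protected branches.
--     refspecs = refspec_tokens[1:] if len(refspec_tokens) > 1 else []
--
--     for refspec in refspecs:
--         # refspec can be: 'main', 'HEAD:main', 'refs/heads/main', 'feature:main'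
--         # Extract destination side (after ':' if present).
--         dest = refspec.split(":")[-1] if ":" in refspec else refspec
--         # Strip refs/heads/ prefix
--         if dest.startswith("refs/heads/"):
--             dest = dest[len("refs/heads/"):]
--         if dest in _PROTECTED_BRANCHES:
--             return True
--
--     # Also check non-refspec form: git push origin main (bare branch name)
--     # If the only refspec token is a protected branch name (no colon), it's a target.
--     if refspec_tokens and len(refspec_tokens) >= 2:
--         candidate = refspec_tokens[-1]
--         if ":" not in candidate and candidate in _PROTECTED_BRANCHES:
--             return True
--
--     return False
-- ===== SOURCE B (Python) =====
-- _PROTECTED_BRANCHES: frozenset[str] = frozenset({"main", "master"})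
--
-- _VALUE_FLAGS = {
--     "--receive-pack",
--     "--repo",
--     "--push-option",
--     "-o",
--     "--recurse-submodules",
--     "--signed",
-- }
--
--
-- def _push_targets_protected_branch(argv: list[str]) -> bool:
--     """One forward pass over argv[2:]: the first non-flag token is the remote
--     (recorded, never checked); every later non-flag token is a refspec whose
--     destination side is checked immediately."""
--     seen_remote = False
--     i = 2
--     while i < len(argv):
--         token = argv[i]
--         if not token.startswith("-"):
--             if seen_remote:
--                 dest = token.split(":")[-1] if ":" in token else token
--                 if dest.startswith("refs/heads/"):
--                     dest = dest[len("refs/heads/"):]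
--                 if dest in _PROTECTED_BRANCHES:
--                     return True
--             seen_remote = True
--         elif "=" not in token and token in _VALUE_FLAGS:
--             i += 1  # flag takes a value: skip it
--         i += 1
--     return False
-- ===== Notes on version B (the rewrite author's own statement) =====
-- stated objective: simpler
-- what changed: A collects the non-flag tokens into a list and then scans that list twice (refspec loop plus a redundant final bare-branch block); B does a single forward pass over argv[2:] with a seen-remote flag, checking each refspec destination the moment it is met, and drops the dead final block.
import Mathlib
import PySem

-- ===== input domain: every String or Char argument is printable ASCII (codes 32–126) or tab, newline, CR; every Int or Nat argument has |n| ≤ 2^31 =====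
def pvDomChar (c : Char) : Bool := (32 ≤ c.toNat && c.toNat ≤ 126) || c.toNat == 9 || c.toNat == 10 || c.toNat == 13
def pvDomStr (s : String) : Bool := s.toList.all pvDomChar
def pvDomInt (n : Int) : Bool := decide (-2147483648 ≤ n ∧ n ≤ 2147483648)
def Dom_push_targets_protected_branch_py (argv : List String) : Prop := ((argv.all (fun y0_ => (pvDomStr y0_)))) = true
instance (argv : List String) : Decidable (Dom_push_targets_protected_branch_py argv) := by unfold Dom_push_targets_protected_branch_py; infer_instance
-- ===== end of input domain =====

-- B fuses A's collect-then-scan into ONE pass over argv[2:] (a seen-remote flag checks each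
-- refspec as it is met) and drops A's final bare-branch block, which is redundant.

-- Transcription of the destination-check lines both Pythons contain verbatim:
-- dest = refspec.split(":")[-1] if ":" in refspec else refspec; strip "refs/heads/";
-- dest in {"main", "master"}.  (split(":") with nonempty sep is `some` and never
-- returns an empty list, so [-1] is exactly getLastD "".)
def checkRefspec (refspec : String) : Bool :=
  let dest := if PySem.Str.isIn ":" refspec
              then ((PySem.Str.split? refspec ":").getD []).getLastD ""
              else refspec
  let dest := if PySem.Str.startswith dest "refs/heads/"
              then PySem.Str.slice dest (some 11) none   -- dest[len("refs/heads/"):]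
              else dest
  dest ∈ (["main", "master"] : List String)

def pyValueFlags : List String :=
  ["--receive-pack", "--repo", "--push-option", "-o", "--recurse-submodules", "--signed"]

-- ===== PORT A =====
-- A's first while-loop: collect non-flag tokens, skipping the value of a value-taking flag.
def pyCollect (ts : List String) : List String :=
  match ts with
  | [] => []
  | t :: rest =>
    if ¬ PySem.Str.startswith t "-" then t :: pyCollect rest
    else if ¬ PySem.Str.isIn "=" t then
      if t ∈ pyValueFlags then pyCollect (rest.drop 1) else pyCollect rest
    else pyCollect rest
termination_by ts.length
decreasing_by all_goals (simp only [List.length_cons, List.length_drop]; omega)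

-- A's second loop: 'for refspec in refspecs: … return True'.
def pyScan (rs : List String) : Bool :=
  match rs with
  | [] => false
  | r :: rest => if checkRefspec r then true else pyScan rest

def push_targets_protected_branch_py (argv : List String) : Bool :=
  let refspec_tokens := pyCollect (argv.drop 2)
  let refspecs := if refspec_tokens.length > 1 then refspec_tokens.drop 1 else []
  if pyScan refspecs then true
  else if refspec_tokens ≠ [] ∧ refspec_tokens.length ≥ 2 then
    -- candidate = refspec_tokens[-1]; the list is provably nonempty here, so [-1] = getLastD ""
    let candidate := refspec_tokens.getLastD ""
    if ¬ PySem.Str.isIn ":" candidate ∧ candidate ∈ (["main", "master"] : List String)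
    then true else false
  else false

-- ===== PORT B =====
-- B's single pass: seen = 'the remote was already seen'; check every later non-flag token.
def altGo (ts : List String) (seen : Bool) : Bool :=
  match ts with
  | [] => false
  | t :: rest =>
    if ¬ PySem.Str.startswith t "-" then
      if seen && checkRefspec t then true else altGo rest true
    else if ¬ PySem.Str.isIn "=" t && t ∈ pyValueFlags then altGo (rest.drop 1) seen
    else altGo rest seen
termination_by ts.length
decreasing_by all_goals (simp only [List.length_cons, List.length_drop]; omega)

def push_targets_protected_branch_py_alt (argv : List String) : Bool :=
  altGo (argv.drop 2) false

-- ===== PRECONDITION & SPEC =====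
def Spec_push_targets_protected_branch_py (argv : List String) (out : Bool) : Prop := out = push_targets_protected_branch_py_alt argv
instance (argv : List String) (out : Bool) : Decidable (Spec_push_targets_protected_branch_py argv out) := by unfold Spec_push_targets_protected_branch_py; infer_instance

-- ===== CLAIM (what is proved, stated in full; the proofs are below) =====
def Claim_equal_push_targets_protected_branch_py : Prop := ∀ (argv : List String), Dom_push_targets_protected_branch_py argv → Spec_push_targets_protected_branch_py argv (push_targets_protected_branch_py argv)

-- ===== LEMMAS AND PROOFS =====

-- B's pass computes A's scan over A's collected tokens (dropping the first = the remote).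
theorem altGo_eq (ts : List String) (seen : Bool) :
    altGo ts seen
      = (if seen then pyCollect ts else (pyCollect ts).drop 1).any checkRefspec := by
  induction ts, seen using altGo.induct with
  | case1 seen => cases seen <;> simp [altGo, pyCollect]
  | case2 seen t rest h1 h2 =>
    rcases Bool.and_eq_true_iff.mp h2 with ⟨hs, hc⟩
    subst hs
    simp at h1
    simp [altGo, pyCollect, h1, hc]
  | case3 seen t rest h1 h2 ih =>
    simp at h1
    cases seen
    · simp [altGo, pyCollect, h1, ih]
    · simp only [Bool.true_and] at h2
      simp [altGo, pyCollect, h1, ih, Bool.eq_false_iff.mpr h2]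
  | case4 seen t rest h1 h2 ih =>
    rcases Bool.and_eq_true_iff.mp h2 with ⟨ha, hb⟩
    simp at h1 ha hb
    simp only [List.drop_one] at ih
    simp [altGo, pyCollect, h1, ha, hb, ih]
  | case5 seen t rest h1 h2 ih =>
    simp at h1 h2
    rcases Decidable.em (PySem.Chars.isIn ['='] t.toList = false) with h | h
    · have hb : t ∉ pyValueFlags := by
        intro hm
        exact absurd (h2 (by simpa using h)) (by simp [hm])
      simp [altGo, pyCollect, h1, h, hb, ih]
    · have h' : PySem.Chars.isIn ['='] t.toList = true := by
        cases hx : PySem.Chars.isIn ['='] t.toList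
        · exact absurd hx h
        · rfl
      simp [altGo, pyCollect, h1, h', ih]

theorem pyScan_eq_any (rs : List String) : pyScan rs = rs.any checkRefspec := by
  induction rs with
  | nil => rfl
  | cons r rest ih =>
    rw [pyScan]
    by_cases h : checkRefspec r = true <;> simp [h, ih]

-- A bare protected branch name passes the refspec check too (so A's final block is dead).
theorem checkRefspec_protected (c : String)
    (hc : c ∈ (["main", "master"] : List String)) : checkRefspec c = true := by
  simp only [List.mem_cons, List.not_mem_nil, or_false] at hc
  rcases hc with rfl | rfl <;> decide

theorem getLastD_mem (b : String) (rest : List String) : rest.getLastD b ∈ b :: rest := by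
  induction rest generalizing b with
  | nil => simp
  | cons c t ih =>
    rw [List.getLastD_cons]
    exact List.mem_cons_of_mem b (ih c)

-- ===== VERDICT (by name: the statement is the Claim_ definition above) =====
theorem push_targets_protected_branch_py_spec : Claim_equal_push_targets_protected_branch_py := by
  intro argv _
  unfold Spec_push_targets_protected_branch_py
  simp only [push_targets_protected_branch_py, push_targets_protected_branch_py_alt]
  rw [altGo_eq, if_neg (by decide : ¬ (false = true))]
  set tokens := pyCollect (argv.drop 2) with htok
  rcases Nat.lt_or_ge 1 tokens.length with hlen | hlen
  · rw [if_pos hlen, pyScan_eq_any]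
    by_cases hany : (tokens.drop 1).any checkRefspec = true
    · rw [if_pos hany]
      exact hany.symm
    · rw [if_neg hany]
      have hne : tokens ≠ [] := by intro h; rw [h] at hlen; simp at hlen
      rw [if_pos ⟨hne, hlen⟩]
      have h2 : ¬ (¬ PySem.Str.isIn ":" (tokens.getLastD "") = true ∧
          tokens.getLastD "" ∈ (["main", "master"] : List String)) := by
        rintro ⟨-, hmem⟩
        apply hany
        apply List.any_eq_true.mpr
        refine ⟨tokens.getLastD "", ?_, checkRefspec_protected _ hmem⟩
        match tokens, hlen with
        | a :: b :: rest, _ =>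
          simp only [List.getLastD_cons, List.drop_succ_cons, List.drop_zero]
          exact getLastD_mem b rest
      rw [if_neg h2]
      exact (Bool.not_eq_true _ |>.mp hany) ▸ rfl
  · rw [if_neg (show ¬ tokens.length > 1 by omega)]
    rw [if_neg (show ¬ (pyScan [] = true) by decide)]
    rw [if_neg (by rintro ⟨-, h2⟩; omega)]
    rw [List.drop_eq_nil_of_le (by omega)]
    rfl
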